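-- pv_equiv track=rewrite | github.com/quasar2yh/algorithm | day4/code057/code057_red.py | solution
-- ===== SOURCE A (Python) =====
-- def solution(n, control):
--     answer = n
--     for i in range(0,len(control)):
--         if control[i] == 'w':
--             answer += 1
--         elif control[i] == 's':
--             answer -= 1
--         elif control[i] == 'd':
--             answer += 10
--         elif control[i] == 'a':
--             answer -= 10
--     return answer
-- ===== SOURCE B (Python) =====
-- from itertools import groupby
--
-- def solution(n, control):
--     # Sort the moves, collapse equal moves into runs, add weight * run-length per run.
--     weights = {'w': 1, 's': -1, 'd': 10, 'a': -10}
--     total = n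
--     for key, run in groupby(sorted(control)):
--         total += weights.get(key, 0) * sum(1 for _ in run)
--     return total
-- ===== Notes on version B (the rewrite author's own statement) =====
-- stated objective: alternative
-- what changed: Replaced the per-element if/elif accumulation loop with sort-then-scan: the moves are sorted, collapsed into runs of equal moves with itertools.groupby, and each run contributes weight*run-length from a lookup table; correctness relies on the sum being order-independent.
import Mathlib
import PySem

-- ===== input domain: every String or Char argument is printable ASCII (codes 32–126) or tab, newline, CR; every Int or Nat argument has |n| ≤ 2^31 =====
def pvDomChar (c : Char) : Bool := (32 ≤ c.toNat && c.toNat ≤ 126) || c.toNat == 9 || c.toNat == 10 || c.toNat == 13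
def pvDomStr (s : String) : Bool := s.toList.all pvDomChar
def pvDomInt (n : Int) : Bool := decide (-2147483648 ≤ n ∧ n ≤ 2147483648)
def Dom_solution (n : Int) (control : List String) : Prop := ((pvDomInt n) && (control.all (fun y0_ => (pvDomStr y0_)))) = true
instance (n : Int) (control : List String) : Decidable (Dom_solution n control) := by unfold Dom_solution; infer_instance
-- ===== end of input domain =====

-- B replaces A's per-element if/elif accumulation loop by sort-then-scan: sort the moves,
-- collapse equal moves into runs (groupby), add weight * run-length per run (objective: alternative).

-- ===== PORT A =====
-- Port of A: indexed loop over range(0, len(control)) with the if/elif chain.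
def solution (n : Int) (control : List String) : Int :=
  (PySem.List.pyRange 0 (control.length : Int) 1).foldl (fun answer i =>
    if PySem.List.pyGetD control i "" = "w" then answer + 1
    else if PySem.List.pyGetD control i "" = "s" then answer - 1
    else if PySem.List.pyGetD control i "" = "d" then answer + 10
    else if PySem.List.pyGetD control i "" = "a" then answer - 10
    else answer) n

-- ===== PORT B =====
-- itertools.groupby over an already-sorted list, rendered as run-length encoding:
-- each run of equal adjacent elements becomes (key, length).
def pvRuns : List String → List (String × Int)
  | [] => []
  | x :: xs =>
    match pvRuns xs with
    | [] => [(x, 1)]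
    | (y, k) :: rest => if x = y then (y, k + 1) :: rest else (x, 1) :: (y, k) :: rest

def pvWeights : PySem.Dict String Int := PySem.Dict.ofList [("w", 1), ("s", -1), ("d", 10), ("a", -10)]

-- Port of B: sort, group into runs, accumulate weights.get(key, 0) * run-length.
def solution_alt (n : Int) (control : List String) : Int :=
  (pvRuns (PySem.List.sorted control (fun x => x) false)).foldl
    (fun total kr => total + (PySem.Dict.getD pvWeights kr.1 0) * kr.2) n

-- ===== PRECONDITION & SPEC =====
def Spec_solution (n : Int) (control : List String) (out : Int) : Prop := out = solution_alt n control
instance (n : Int) (control : List String) (out : Int) : Decidable (Spec_solution n control out) := by unfold Spec_solution; infer_instance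

-- ===== CLAIM (what is proved, stated in full; the proofs are below) =====
def Claim_equal_solution : Prop := ∀ (n : Int) (control : List String), Dom_solution n control → Spec_solution n control (solution n control)

-- ===== LEMMAS AND PROOFS =====

-- the per-move weight, shared characterisation of both sides
def pvW (s : String) : Int := PySem.Dict.getD pvWeights s 0

lemma pvW_eval (s : String) :
    pvW s = if s = "w" then 1 else if s = "s" then -1 else if s = "d" then 10
            else if s = "a" then -10 else 0 := by
  have hw : pvWeights = PySem.Dict.mk [("w", 1), ("s", -1), ("d", 10), ("a", -10)] := by decide
  unfold pvW
  rw [hw]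
  split_ifs with h1 h2 h3 h4
  · subst h1; decide
  · subst h2; decide
  · subst h3; decide
  · subst h4; decide
  · have e1 : ("w" == s) = false := beq_eq_false_iff_ne.mpr (fun h => h1 h.symm)
    have e2 : ("s" == s) = false := beq_eq_false_iff_ne.mpr (fun h => h2 h.symm)
    have e3 : ("d" == s) = false := beq_eq_false_iff_ne.mpr (fun h => h3 h.symm)
    have e4 : ("a" == s) = false := beq_eq_false_iff_ne.mpr (fun h => h4 h.symm)
    simp [PySem.Dict.getD, PySem.Dict.get?, List.find?, e1, e2, e3, e4]

-- A's loop computes n + the sum of weights over control, in order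
lemma solution_eq_sum (n : Int) (control : List String) :
    solution n control = n + ((control.map pvW).sum) := by
  unfold solution
  rw [PySem.List.foldl_pyRange_zero_pyGetD' control ""
    (fun answer c => if c = "w" then answer + 1 else if c = "s" then answer - 1
      else if c = "d" then answer + 10 else if c = "a" then answer - 10 else answer) n]
  induction control generalizing n with
  | nil => simp
  | cons x xs ih =>
    simp only [List.foldl_cons, List.map_cons, List.sum_cons, ih, pvW_eval]
    split_ifs <;> ring

-- shifting the accumulator of B's run fold shifts the result by the same amount
lemma pv_foldl_shift (rs : List (String × Int)) (a c : Int) :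
    rs.foldl (fun total kr => total + (PySem.Dict.getD pvWeights kr.1 0) * kr.2) (a + c)
      = rs.foldl (fun total kr => total + (PySem.Dict.getD pvWeights kr.1 0) * kr.2) a + c := by
  induction rs generalizing a with
  | nil => simp
  | cons p ps ih =>
    simp only [List.foldl_cons]
    rw [show a + c + PySem.Dict.getD pvWeights p.1 0 * p.2
          = (a + PySem.Dict.getD pvWeights p.1 0 * p.2) + c by ring, ih]

-- B's run scan computes acc + the sum of weights over the grouped list (any list; sortedness not needed)
lemma runs_fold_eq_sum (l : List String) (acc : Int) :
    (pvRuns l).foldl (fun total kr => total + (PySem.Dict.getD pvWeights kr.1 0) * kr.2) acc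
      = acc + ((l.map pvW).sum) := by
  induction l generalizing acc with
  | nil => simp [pvRuns]
  | cons x xs ih =>
    simp only [pvRuns, List.map_cons, List.sum_cons]
    cases hr : pvRuns xs with
    | nil =>
      have h0 := ih (acc := acc)
      rw [hr] at h0
      simp only [List.foldl_nil] at h0
      have hsum : ((xs.map pvW).sum) = 0 := by omega
      simp only [List.foldl_cons, List.foldl_nil, hsum]
      show acc + pvW x * 1 = acc + (pvW x + 0)
      ring
    | cons p rest =>
      obtain ⟨y, k⟩ := p
      by_cases hxy : x = y
      · subst hxy
        simp only [reduceIte, List.foldl_cons]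
        have h2 := ih (acc := acc)
        rw [hr] at h2
        simp only [List.foldl_cons] at h2
        have hx1 : acc + PySem.Dict.getD pvWeights x 0 * (k + 1)
            = (acc + PySem.Dict.getD pvWeights x 0 * k) + PySem.Dict.getD pvWeights x 0 := by ring
        rw [hx1, pv_foldl_shift, h2]
        show acc + ((xs.map pvW).sum) + pvW x = acc + (pvW x + (xs.map pvW).sum)
        ring
      · simp only [if_neg hxy, List.foldl_cons]
        have h2 := ih (acc := acc + PySem.Dict.getD pvWeights x 0 * 1)
        rw [hr] at h2
        simp only [List.foldl_cons] at h2
        rw [h2]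
        show acc + pvW x * 1 + ((xs.map pvW).sum) = acc + (pvW x + (xs.map pvW).sum)
        ring

theorem solution_spec : Claim_equal_solution := by
  intro n control _
  unfold Spec_solution solution_alt
  rw [runs_fold_eq_sum, solution_eq_sum]
  have hp : (PySem.List.sorted control (fun x => x) false).Perm control :=
    PySem.List.sorted_perm control (fun x => x) false
  have := (hp.map pvW).sum_eq
  rw [this]
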